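-- pv_equiv track=rewrite | github.com/jonathanbrnn/leetcode | MEDIUM/Find and Replace Pattern (MEDIUM)/sol.py | convert
-- ===== SOURCE A (Python) =====
-- def convert(word: str) -> list:
--     i = 0
--     patt = []
--     dic = {}
--
--     for char in word:
--         if char not in dic:
--             dic[char] = str(i)
--             i += 1
--         patt.append(dic[char])
--
--     return patt
-- ===== SOURCE B (Python) =====
-- def convert(word: str) -> list:
--     # Each position's label is computed independently by a closed formula:
--     # the label of character c is the number of distinct characters strictly
--     # before c's first occurrence, i.e. len(set(prefix up to and including
--     # the first occurrence of c)) - 1.  No counter, no rank table.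
--     chars = list(word)
--     out = []
--     for c in chars:
--         k = chars.index(c)
--         out.append(str(len(set(chars[:k + 1])) - 1))
--     return out
-- ===== Notes on version B (the rewrite author's own statement) =====
-- stated objective: alternative
-- what changed: Replaces A's stateful single pass (counter + growing dict of ranks) with a stateless per-position closed formula: each character's label is len(set(word[:word.index(c)+1])) - 1, the distinct-character count of the prefix ending at its first occurrence; no table or counter is maintained.
import Mathlib
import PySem

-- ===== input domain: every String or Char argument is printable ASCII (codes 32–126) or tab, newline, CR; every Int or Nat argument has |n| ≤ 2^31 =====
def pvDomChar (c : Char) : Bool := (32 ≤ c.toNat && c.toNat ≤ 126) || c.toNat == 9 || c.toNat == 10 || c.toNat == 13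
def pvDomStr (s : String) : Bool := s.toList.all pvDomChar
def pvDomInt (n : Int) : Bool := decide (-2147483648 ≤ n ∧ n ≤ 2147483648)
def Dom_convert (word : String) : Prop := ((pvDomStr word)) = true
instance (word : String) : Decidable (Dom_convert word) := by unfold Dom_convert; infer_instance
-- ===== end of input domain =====

-- B replaces A's stateful pass (counter + growing rank dict) with a stateless
-- per-position closed formula: label(c) = len(set(word[:word.index(c)+1])) - 1
-- (objective: alternative algorithm, same results; B is quadratic, not faster).

-- ===== PORT A =====
-- A's loop: state (i, patt, dic); for each char, if not yet in dic insert str(i) and bump i,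
-- then append dic[char].  'dic[char]' after the insert is always present, so .getD "" is exact.
def convertLoop (rest : List Char) (i : Int) (patt : List String)
    (dic : PySem.Dict Char String) : List String :=
  match rest with
  | [] => patt
  | c :: rest' =>
    if ¬ dic.contains c then
      let dic' := dic.insert c (PySem.Int.toStr i)
      convertLoop rest' (i + 1) (patt ++ [(dic'.get? c).getD ""]) dic'
    else
      convertLoop rest' i (patt ++ [(dic.get? c).getD ""]) dic

def convert (word : String) : List String :=
  convertLoop word.toList 0 [] PySem.Dict.empty

-- ===== PORT B =====
-- chars = list(word); for each c: k = chars.index(c); append str(len(set(chars[:k+1])) - 1).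
-- chars.index(c) never raises (c ∈ chars), so .getD 0 is exact.
def convert_alt (word : String) : List String :=
  let chars := word.toList
  chars.map (fun c =>
    let k : Nat := (PySem.List.index? chars c).getD 0
    PySem.Int.toStr
      (((PySem.Set.ofList (PySem.List.slice chars none (some ((k : Int) + 1)))).length : Int) - 1))

-- ===== PRECONDITION & SPEC =====
def Spec_convert (word : String) (out : List String) : Prop := out = convert_alt word
instance (word : String) (out : List String) : Decidable (Spec_convert word out) := by unfold Spec_convert; infer_instance

-- ===== CLAIM (what is proved, stated in full; the proofs are below) =====
def Claim_equal_convert : Prop := ∀ (word : String), Dom_convert word → Spec_convert word (convert word)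

-- ===== LEMMAS AND PROOFS =====

-- folding Set.add only appends, so the start state is a prefix of the result
lemma foldl_add_prefix (q : List Char) (s : List Char) :
    ∃ t, q.foldl PySem.Set.add s = s ++ t := by
  induction q generalizing s with
  | nil => exact ⟨[], by simp⟩
  | cons x q ih =>
    obtain ⟨t, ht⟩ := ih (PySem.Set.add s x)
    by_cases hx : x ∈ s
    · refine ⟨t, ?_⟩
      simpa [List.foldl, PySem.Set.add, PySem.Set.contains, hx] using ht
    · refine ⟨x :: t, ?_⟩
      simp only [List.foldl]
      rw [ht]
      simp [PySem.Set.add, PySem.Set.contains, hx]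

-- main invariant for A's loop: result = labels by rank in the full dedup list U
lemma convertLoop_spec (U : List Char) (rest : List Char) :
    ∀ (s : List Char) (i : Int) (patt : List String) (dic : PySem.Dict Char String),
    rest.foldl PySem.Set.add s = U →
    (∀ x, dic.get? x = (PySem.List.index? s x).map (fun k => PySem.Int.toStr (k : Int))) →
    i = (s.length : Int) →
    convertLoop rest i patt dic =
      patt ++ rest.map (fun c => PySem.Int.toStr (((PySem.List.index? U c).getD 0 : Nat) : Int)) := by
  induction rest with
  | nil => intro s i patt dic _ _ _; simp [convertLoop]
  | cons c rest ih =>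
    intro s i patt dic hfold hdic hi
    simp only [List.foldl] at hfold
    by_cases hc : c ∈ s
    · -- seen before: dic hit, state unchanged
      have hadd : PySem.Set.add s c = s := by simp [PySem.Set.add, PySem.Set.contains, hc]
      rw [hadd] at hfold
      obtain ⟨k, hk⟩ : ∃ k, PySem.List.index? s c = some k := by
        have := (PySem.List.index?_isSome_iff (xs := s) (v := c)).2 hc
        exact Option.isSome_iff_exists.1 this
      have hcont : dic.contains c = true := by
        have : (dic.get? c).isSome := by rw [hdic c, hk]; rfl
        simpa [PySem.Dict.contains_eq_isSome_get?] using this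
      obtain ⟨t, ht⟩ := foldl_add_prefix rest s
      have hU : PySem.List.index? U c = some k := by
        rw [← hfold, ht, PySem.List.index?_append_of_mem _ hc, hk]
      rw [convertLoop]
      simp only [hcont, not_true_eq_false, if_false]
      rw [ih s i _ dic hfold hdic hi]
      have hv : (dic.get? c).getD "" = PySem.Int.toStr (k : Int) := by rw [hdic c, hk]; rfl
      simp only [PySem.List.index?_eq_idxOf?] at hU
      simp [hv, hU]
    · -- new char: insert str(i), bump i
      have hadd : PySem.Set.add s c = s ++ [c] := by
        simp [PySem.Set.add, PySem.Set.contains, hc]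
      rw [hadd] at hfold
      have hcont : dic.contains c = false := by
        have h1 : PySem.List.index? s c = none :=
          (PySem.List.index?_eq_none_iff _ _).2 hc
        have : dic.get? c = none := by rw [hdic c, h1]; rfl
        simp [PySem.Dict.contains_eq_isSome_get?, this]
      have hidxc : PySem.List.index? (s ++ [c]) c = some s.length :=
        PySem.List.index?_append_singleton_self _ c hc
      have hdic' : ∀ x, (dic.insert c (PySem.Int.toStr i)).get? x =
          (PySem.List.index? (s ++ [c]) x).map (fun k => PySem.Int.toStr (k : Int)) := by
        intro x
        by_cases hx : x = c
        · subst hx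
          rw [PySem.Dict.get?_insert_self, hidxc]
          simp [hi]
        · rw [PySem.Dict.get?_insert_of_ne _ _ (by simpa using hx)]
          by_cases hxs : x ∈ s
          · rw [hdic x, PySem.List.index?_append_of_mem _ hxs]
          · have h1 : PySem.List.index? s x = none :=
              (PySem.List.index?_eq_none_iff _ _).2 hxs
            have h2 : PySem.List.index? (s ++ [c]) x = none := by
              refine (PySem.List.index?_eq_none_iff _ _).2 ?_
              simp [hxs, hx]
            rw [hdic x, h1, h2]
      obtain ⟨t, ht⟩ := foldl_add_prefix rest (s ++ [c])
      have hU : PySem.List.index? U c = some s.length := by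
        rw [← hfold, ht, PySem.List.index?_append_of_mem _ (by simp), hidxc]
      rw [convertLoop]
      simp only [hcont, Bool.false_eq_true, not_false_eq_true, if_true]
      rw [ih (s ++ [c]) (i + 1) _ _ hfold hdic' (by simp [hi])]
      simp only [PySem.List.index?_eq_idxOf?] at hU
      simp [hU, hi]

-- B's per-position value: for c ∈ wl with first occurrence at k,
-- the dedup of the prefix take (k+1) ends with c, and its length - 1 is c's rank in dedup wl.
lemma rank_eq_prefix_card (wl : List Char) (c : Char) (k : Nat)
    (hk : PySem.List.index? wl c = some k) :
    ((PySem.List.index? (PySem.List.dedup wl) c).getD 0 : Int) =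
      ((PySem.Set.ofList (wl.take (k + 1))).length : Int) - 1 := by
  obtain ⟨pre, suf, hwl, hlen, hpre⟩ := (PySem.List.index?_eq_some_iff _ _ _).1 hk
  have hcnot : c ∉ PySem.Set.ofList pre := by
    rw [← PySem.List.dedup_eq_ofList]
    simpa [PySem.List.mem_dedup] using hpre
  have htake : wl.take (k + 1) = pre ++ [c] := by
    subst hwl hlen
    simp [List.take_append]
  have hof_take : PySem.Set.ofList (wl.take (k + 1)) = PySem.Set.ofList pre ++ [c] := by
    rw [htake, PySem.Set.ofList_eq_foldl, List.foldl_append, ← PySem.Set.ofList_eq_foldl]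
    simp [PySem.Set.add, PySem.Set.contains, hcnot]
  have hof_wl : ∃ t, PySem.Set.ofList wl = PySem.Set.ofList pre ++ [c] ++ t := by
    subst hwl
    rw [PySem.Set.ofList_eq_foldl, List.foldl_append, List.foldl_cons,
      ← PySem.Set.ofList_eq_foldl]
    have : PySem.Set.add (PySem.Set.ofList pre) c = PySem.Set.ofList pre ++ [c] := by
      simp [PySem.Set.add, PySem.Set.contains, hcnot]
    rw [this]
    exact foldl_add_prefix suf _
  obtain ⟨t, ht⟩ := hof_wl
  have hidx : PySem.List.index? (PySem.List.dedup wl) c = some (PySem.Set.ofList pre).length := by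
    rw [PySem.List.dedup_eq_ofList, ht,
      PySem.List.index?_append_of_mem _ (by simp : c ∈ PySem.Set.ofList pre ++ [c]),
      PySem.List.index?_append_singleton_self _ _ hcnot]
  rw [hidx, hof_take]
  simp

theorem convert_spec_aux (word : String) : convert word = convert_alt word := by
  unfold convert convert_alt
  rw [convertLoop_spec (PySem.List.dedup word.toList) word.toList [] 0 [] PySem.Dict.empty]
  · simp only [List.nil_append]
    refine List.map_congr_left ?_
    intro c hc
    obtain ⟨k, hk⟩ : ∃ k, PySem.List.index? word.toList c = some k := by
      have := (PySem.List.index?_isSome_iff (xs := word.toList) (v := c)).2 hc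
      exact Option.isSome_iff_exists.1 this
    have hslice : PySem.List.slice word.toList none
        (some ((((PySem.List.index? word.toList c).getD 0 : Nat) : Int) + 1)) =
        word.toList.take (k + 1) := by
      rw [hk]
      have : (((k : Nat) : Int) + 1) = (((k + 1 : Nat) : Int)) := by push_cast; ring
      simp only [Option.getD_some, this, PySem.List.slice_to_natCast]
    rw [hslice, congrArg PySem.Int.toStr (rank_eq_prefix_card word.toList c k hk)]
  · rw [PySem.List.dedup_eq_ofList, PySem.Set.ofList_eq_foldl]
  · intro x; rfl
  · simp

-- ===== VERDICT (by name: the statement is the Claim_ definition above) =====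
theorem convert_spec : Claim_equal_convert := by
  intro word _
  unfold Spec_convert
  exact convert_spec_aux word
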